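-- pv_equiv track=rewrite | github.com/tommyham/atcoder | abc8 2020 02 15/abc8-C.py | com_str
-- ===== SOURCE A (Python) =====
-- def com_str(A,B,i):
--     ans=A
--     if(A==B):
--         pass
--     elif(ord(A[i])>ord(B[i])):
--         pass
--     elif(ord(B[i])>ord(A[i])):
--         ans=B
--     else:
--         ans=com_str(A,B,i+1)
--     return ans
-- ===== SOURCE B (Python) =====
-- def com_str(A, B, i):
--     if A == B:
--         return A
--     while A[i] == B[i]:
--         i += 1
--     return A if A[i] > B[i] else B
-- ===== Notes on version B (the rewrite author's own statement) =====
-- stated objective: simpler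
-- what changed: Replaces A's recursion (which re-runs the full A==B string comparison at every level) by one tie check followed by a while loop that advances to the first mismatching index and a single final character comparison; Pre_ excludes exactly the inputs where A raises IndexError (A != B but no mismatch occurs at an in-range position >= i).
import Mathlib
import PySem

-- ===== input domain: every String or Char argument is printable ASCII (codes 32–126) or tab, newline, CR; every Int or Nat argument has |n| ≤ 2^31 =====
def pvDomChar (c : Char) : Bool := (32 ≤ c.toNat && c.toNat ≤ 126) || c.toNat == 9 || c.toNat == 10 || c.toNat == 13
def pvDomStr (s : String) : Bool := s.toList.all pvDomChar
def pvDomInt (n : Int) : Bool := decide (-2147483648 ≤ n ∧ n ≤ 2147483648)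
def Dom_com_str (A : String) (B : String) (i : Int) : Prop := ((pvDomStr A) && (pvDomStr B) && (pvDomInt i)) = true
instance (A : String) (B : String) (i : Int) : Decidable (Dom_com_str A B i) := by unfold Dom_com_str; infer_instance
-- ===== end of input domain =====

-- B replaces A's recursion (which re-runs the full A==B comparison at every level) by one tie
-- check, a while loop to the first mismatching index, and a single final character comparison.

-- ===== PORT A =====
-- literal port of A's recursion; fuel only makes it total, '""' stands for the IndexError branch
def comStrFuel (A : String) (B : String) (i : Int) : Nat → String
  | 0 => ""
  | fuel + 1 =>
    if A = B then A
    else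
      match PySem.Str.pyGet? A i, PySem.Str.pyGet? B i with
      | some a, some b =>
        if a.toNat > b.toNat then A
        else if b.toNat > a.toNat then B
        else comStrFuel A B (i + 1) fuel
      | _, _ => ""   -- IndexError (outside Pre_)

def com_str (A : String) (B : String) (i : Int) : String :=
  comStrFuel A B i (A.length + B.length + i.natAbs + 1)

-- ===== PORT B =====
-- 'while A[i] == B[i]: i += 1' — returns the final value of i; fuel only makes it total
def whileEq (A : String) (B : String) (i : Int) : Nat → Int
  | 0 => i
  | fuel + 1 =>
    match PySem.Str.pyGet? A i, PySem.Str.pyGet? B i with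
    | some a, some b => if a = b then whileEq A B (i + 1) fuel else i
    | _, _ => i   -- IndexError in the loop condition (outside Pre_)

-- 'return A if A[i] > B[i] else B'
def finalCmp (A : String) (B : String) (j : Int) : String :=
  match PySem.Str.pyGet? A j, PySem.Str.pyGet? B j with
  | some a, some b => if a.toNat > b.toNat then A else B
  | _, _ => ""   -- IndexError (outside Pre_)

def com_str_alt (A : String) (B : String) (i : Int) : String :=
  if A = B then A
  else finalCmp A B (whileEq A B i (A.length + B.length + i.natAbs + 1))

-- ===== PRECONDITION & SPEC =====
-- Pre_ admits exactly the inputs on which A returns: either A == B, or the scan starting at i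
-- meets a mismatching in-range index before indexing out of range (otherwise A raises IndexError).
def Pre_com_str (A : String) (B : String) (i : Int) : Prop :=
  A = B ∨
    (-(min A.length B.length : Int) ≤ i ∧
      ∃ j ∈ PySem.List.pyRange (max i (-(min A.length B.length : Int)))
              (min A.length B.length) 1,
        PySem.Str.pyGet? A j ≠ PySem.Str.pyGet? B j)
instance (A : String) (B : String) (i : Int) : Decidable (Pre_com_str A B i) := by
  unfold Pre_com_str; infer_instance

def pvWitness_com_str : String × String × Int := ("ab", "ac", 0)

def Spec_com_str (A : String) (B : String) (i : Int) (out : String) : Prop := out = com_str_alt A B i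
instance (A : String) (B : String) (i : Int) (out : String) : Decidable (Spec_com_str A B i out) := by
  unfold Spec_com_str; infer_instance

-- ===== CLAIM (what is proved, stated in full; the proofs are below) =====
def Claim_equal_com_str : Prop := ∀ (A : String) (B : String) (i : Int),
  Dom_com_str A B i → Pre_com_str A B i → Spec_com_str A B i (com_str A B i)

-- ===== LEMMAS AND PROOFS =====

lemma pyGet?_isSome_of_range (s : String) (i : Int)
    (h1 : -(s.length : Int) ≤ i) (h2 : i < (s.length : Int)) :
    ∃ c, PySem.Str.pyGet? s i = some c := by
  have hlen : (s.toList.length : Int) = (s.length : Int) := by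
    simp
  have hne : PySem.List.pyGet? s.toList i ≠ none := by
    intro hc
    rw [PySem.List.pyGet?_eq_none_iff] at hc
    exact hc (by constructor <;> omega)
  simp only [PySem.Str.pyGet?_eq, PySem.Chars.pyGet?_eq_listPyGet?]
  exact Option.ne_none_iff_exists'.mp hne

lemma main_lemma : ∀ (F : Nat) (A B : String) (i : Int), A ≠ B →
    (∃ j : Int, i ≤ j ∧ j < (min A.length B.length : Int) ∧ (j - i).toNat < F ∧
      PySem.Str.pyGet? A j ≠ PySem.Str.pyGet? B j) →
    -(min A.length B.length : Int) ≤ i →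
    comStrFuel A B i F = finalCmp A B (whileEq A B i F) := by
  intro F
  induction F with
  | zero =>
    intro A B i _ ⟨j, hij, _, hfuel, _⟩ _
    omega
  | succ F ih =>
    intro A B i hne ⟨j, hij, hjm, hfuel, hdiff⟩ him
    have him2 : i < (min A.length B.length : Int) := lt_of_le_of_lt hij hjm
    obtain ⟨a, ha⟩ := pyGet?_isSome_of_range A i (by omega) (by omega)
    obtain ⟨b, hb⟩ := pyGet?_isSome_of_range B i (by omega) (by omega)
    by_cases hab : a = b
    · subst hab
      have hji : j ≠ i := by
        intro h; subst h; rw [ha, hb] at hdiff; exact hdiff rfl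
      have := ih A B (i + 1) hne ⟨j, by omega, hjm, by omega, hdiff⟩ (by omega)
      simp only [comStrFuel, whileEq, if_neg hne, ha, hb, lt_irrefl, if_false,
        if_pos, this]
    · have htn : a.toNat ≠ b.toNat := fun h => hab (Char.ext (UInt32.toNat_inj.mp h))
      simp only [comStrFuel, whileEq, if_neg hne, ha, hb, if_neg hab, finalCmp, gt_iff_lt]
      rcases lt_or_gt_of_ne htn with h | h
      · rw [if_neg (by omega), if_pos (by omega), if_neg (by omega)]
      · rw [if_pos (by omega), if_pos (by omega)]

-- ===== VERDICT (by name: the statement is the Claim_ definition above) =====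
theorem com_str_spec : Claim_equal_com_str := by
  intro A B i _ hpre
  unfold Spec_com_str com_str com_str_alt
  by_cases heq : A = B
  · subst heq
    simp [comStrFuel]
  · rcases hpre with h | ⟨him, j, hjmem, hdiff⟩
    · exact absurd h heq
    · rw [if_neg heq]
      rw [PySem.List.mem_pyRange_one] at hjmem
      obtain ⟨hj1, hj2⟩ := hjmem
      have hij : i ≤ j := le_trans (le_max_left _ _) hj1
      apply main_lemma _ A B i heq ⟨j, hij, hj2, ?_, hdiff⟩ him
      omega
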